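-- pv_equiv track=rewrite | github.com/weinbusch/advent-of-code | aoc2022/day08.py | filter_visible
-- ===== SOURCE A (Python) =====
-- def filter_visible(line):
--     visible = set()
--     height = -1
--     for x, y, h in line:
--         if h > height:
--             visible.add((x, y))
--             height = h
--     return visible
-- ===== SOURCE B (Python) =====
-- def filter_visible(line):
--     # pass 1: exclusive prefix-maximum table (pm[i] = max height strictly before i, -1 at i=0)
--     pm = []
--     m = -1
--     for _, _, h in line:
--         pm.append(m)
--         m = max(m, h)
--     # pass 2: filter against the table
--     return {(x, y) for (x, y, h), p in zip(line, pm) if h > p}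
-- ===== Notes on version B (the rewrite author's own statement) =====
-- stated objective: alternative
-- what changed: Replaces the single stateful loop (inline running max + conditional set insert) by two separate passes: first build an exclusive prefix-maximum table, then filter each position against the table with a set comprehension.
import Mathlib
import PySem

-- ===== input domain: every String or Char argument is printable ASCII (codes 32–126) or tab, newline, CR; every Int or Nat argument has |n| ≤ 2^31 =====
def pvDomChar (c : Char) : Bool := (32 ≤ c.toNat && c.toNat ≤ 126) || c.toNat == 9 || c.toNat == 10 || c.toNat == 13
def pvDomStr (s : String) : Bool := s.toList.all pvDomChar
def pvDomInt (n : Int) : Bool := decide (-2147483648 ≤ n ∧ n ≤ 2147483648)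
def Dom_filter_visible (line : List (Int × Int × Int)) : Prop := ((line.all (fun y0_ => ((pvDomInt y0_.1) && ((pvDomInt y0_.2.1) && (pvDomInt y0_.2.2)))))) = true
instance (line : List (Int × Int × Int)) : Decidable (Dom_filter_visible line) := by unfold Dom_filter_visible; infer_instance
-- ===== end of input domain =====

-- B separates the computation into two passes (exclusive prefix-max table, then a filter
-- against it) instead of A's single loop with an inline running max; same O(n) cost.

-- ===== PORT A =====
def filterVisibleGo (line : List (Int × Int × Int)) (visible : PySem.Set (Int × Int)) (height : Int) : List (Int × Int) :=
  match line with
  | [] => visible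
  | (x, y, h) :: rest =>
      if h > height then filterVisibleGo rest (visible.add (x, y)) h
      else filterVisibleGo rest visible height

def filter_visible (line : List (Int × Int × Int)) : List (Int × Int) :=
  filterVisibleGo line PySem.Set.empty (-1)

-- ===== PORT B =====
-- pass 1 of Source B: exclusive prefix-maximum table seeded with -1
def pmTable (m : Int) : List (Int × Int × Int) → List Int
  | [] => []
  | (_, _, h) :: rest => m :: pmTable (max m h) rest

-- pass 2 of Source B: the set comprehension over zip(line, pm)
def filter_visible_alt (line : List (Int × Int × Int)) : List (Int × Int) :=
  (List.zip line (pmTable (-1) line)).foldl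
    (fun (s : PySem.Set (Int × Int)) tp =>
      if tp.1.2.2 > tp.2 then s.add (tp.1.1, tp.1.2.1) else s)
    PySem.Set.empty

-- ===== PRECONDITION & SPEC =====
def Spec_filter_visible (line : List (Int × Int × Int)) (out : List (Int × Int)) : Prop := out = filter_visible_alt line
instance (line : List (Int × Int × Int)) (out : List (Int × Int)) : Decidable (Spec_filter_visible line out) := by unfold Spec_filter_visible; infer_instance

-- ===== CLAIM (what is proved, stated in full; the proofs are below) =====
def Claim_equal_filter_visible : Prop := ∀ (line : List (Int × Int × Int)), Dom_filter_visible line → Spec_filter_visible line (filter_visible line)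

-- ===== LEMMAS AND PROOFS =====

theorem go_eq_fold (line : List (Int × Int × Int)) :
    ∀ (s : PySem.Set (Int × Int)) (m : Int),
      filterVisibleGo line s m =
        (List.zip line (pmTable m line)).foldl
          (fun (s : PySem.Set (Int × Int)) tp =>
            if tp.1.2.2 > tp.2 then s.add (tp.1.1, tp.1.2.1) else s)
          s := by
  induction line with
  | nil => intro s m; rfl
  | cons t rest ih =>
      intro s m
      obtain ⟨x, y, h⟩ := t
      simp only [filterVisibleGo, pmTable, List.zip_cons_cons, List.foldl_cons]
      by_cases hc : h > m
      · have : max m h = h := by omega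
        simp [hc, this, ih]
      · have : max m h = m := by omega
        simp [hc, this, ih]

-- ===== VERDICT (by name: the statement is the Claim_ definition above) =====
theorem filter_visible_spec : Claim_equal_filter_visible := by
  intro line _
  unfold Spec_filter_visible filter_visible filter_visible_alt
  exact go_eq_fold line PySem.Set.empty (-1)
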